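-- pv_equiv track=rewrite | github.com/causify-ai/helpers | linters/amp_lint_md.py | _verify_toc_and_warnings_from_lines
-- ===== SOURCE A (Python) =====
-- from typing import List, Tuple
--
-- def _verify_toc_and_warnings_from_lines(lines: List[str], file_name: str) -> List[str]:
--     """
--     Verify that there is no content before the Table of Contents (TOC) in the lines of a file.
--
--     :param lines: The lines of the markdown file.
--     :param file_name: The name of the markdown file being processed.
--     :return: A list of warnings.
--     """
--     warnings = []
--     toc_found = False
--     for idx, line in enumerate(lines, start=1):
--         if not toc_found and line.strip().lower().startswith("table of contents"):
--             toc_found = True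
--         if not toc_found and not line.strip().startswith("#") and line.strip():
--             warnings.append(f"{file_name}:{idx}: Content found before Table of Contents (TOC).")
--     return warnings
-- ===== SOURCE B (Python) =====
-- from typing import List
--
--
-- def _verify_toc_and_warnings_from_lines(lines: List[str], file_name: str) -> List[str]:
--     # Locate the TOC boundary: index of the first TOC line, or len(lines) if none.
--     boundary = next(
--         (i for i, line in enumerate(lines)
--          if line.strip().lower().startswith("table of contents")),
--         len(lines),
--     )
--     # Warn for every non-empty, non-heading line strictly before the boundary.
--     return [
--         f"{file_name}:{idx}: Content found before Table of Contents (TOC)."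
--         for idx, line in enumerate(lines[:boundary], start=1)
--         if line.strip() and not line.strip().startswith("#")
--     ]
-- ===== Notes on version B (the rewrite author's own statement) =====
-- stated objective: simpler
-- what changed: Replaces the single stateful flag-driven pass with a locate-then-scan decomposition: first find the TOC boundary index, then build warnings from the prefix before it with a comprehension.
import Mathlib
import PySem

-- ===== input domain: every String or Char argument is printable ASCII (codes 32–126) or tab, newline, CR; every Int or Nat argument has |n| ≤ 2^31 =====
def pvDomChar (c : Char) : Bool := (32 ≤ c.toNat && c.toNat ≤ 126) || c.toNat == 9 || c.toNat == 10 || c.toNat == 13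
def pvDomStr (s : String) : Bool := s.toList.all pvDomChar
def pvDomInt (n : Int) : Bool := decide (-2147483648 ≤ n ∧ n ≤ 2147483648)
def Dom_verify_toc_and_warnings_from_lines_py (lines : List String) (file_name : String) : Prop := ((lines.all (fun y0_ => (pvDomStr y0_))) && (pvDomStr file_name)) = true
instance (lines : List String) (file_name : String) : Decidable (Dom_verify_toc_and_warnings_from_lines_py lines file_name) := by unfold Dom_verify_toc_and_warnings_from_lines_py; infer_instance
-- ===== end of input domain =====

-- B replaces A's single stateful flag-driven pass by a locate-the-TOC-boundary-then-scan-the-prefix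
-- decomposition (objective: simpler; same O(n) cost).

-- shared: the TOC test and the warning message
def pvIsTOC (l : String) : Bool :=
  PySem.Str.startswith (PySem.Str.lower (PySem.Str.strip l)) "table of contents"

def pvMsg (fn : String) (idx : Int) : String :=
  fn ++ ":" ++ PySem.Int.toStr idx ++ ": Content found before Table of Contents (TOC)."

-- ===== PORT A =====
-- A's warn condition, in A's order: not line.strip().startswith("#") and line.strip()
def pvWarnA (l : String) : Bool :=
  !(PySem.Str.startswith (PySem.Str.strip l) "#") && !(PySem.Str.strip l == "")

-- A's loop: one pass carrying the toc_found flag and the 1-based index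
def pvGoA (fn : String) (idx : Int) (toc : Bool) : List String → List String
  | [] => []
  | l :: ls =>
    let toc' := if !toc && pvIsTOC l then true else toc
    let rest := pvGoA fn (idx + 1) toc' ls
    if !toc' && pvWarnA l then pvMsg fn idx :: rest else rest

def verify_toc_and_warnings_from_lines_py (lines : List String) (file_name : String) : List String :=
  pvGoA file_name 1 false lines

-- ===== PORT B =====
-- B's warn condition, in B's order: line.strip() and not line.strip().startswith("#")
def pvWarnB (l : String) : Bool :=
  !(PySem.Str.strip l == "") && !(PySem.Str.startswith (PySem.Str.strip l) "#")

-- B's prefix scan: emit a warning per offending line of the prefix (no flag)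
def pvGoB (fn : String) (idx : Int) : List String → List String
  | [] => []
  | l :: ls => if pvWarnB l then pvMsg fn idx :: pvGoB fn (idx + 1) ls
               else pvGoB fn (idx + 1) ls

def verify_toc_and_warnings_from_lines_py_alt (lines : List String) (file_name : String) : List String :=
  let boundary := lines.findIdx pvIsTOC   -- first TOC line, or lines.length if none
  pvGoB file_name 1 (lines.take boundary)

-- ===== PRECONDITION & SPEC =====
def Spec_verify_toc_and_warnings_from_lines_py (lines : List String) (file_name : String) (out : List String) : Prop := out = verify_toc_and_warnings_from_lines_py_alt lines file_name
instance (lines : List String) (file_name : String) (out : List String) : Decidable (Spec_verify_toc_and_warnings_from_lines_py lines file_name out) := by unfold Spec_verify_toc_and_warnings_from_lines_py; infer_instance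

-- ===== CLAIM (what is proved, stated in full; the proofs are below) =====
def Claim_equal_verify_toc_and_warnings_from_lines_py : Prop := ∀ (lines : List String) (file_name : String), Dom_verify_toc_and_warnings_from_lines_py lines file_name → Spec_verify_toc_and_warnings_from_lines_py lines file_name (verify_toc_and_warnings_from_lines_py lines file_name)

-- ===== LEMMAS AND PROOFS =====

theorem pvWarnA_eq_pvWarnB (l : String) : pvWarnA l = pvWarnB l := by
  simp [pvWarnA, pvWarnB, Bool.and_comm]

theorem pvGoA_true (fn : String) (ls : List String) (idx : Int) :
    pvGoA fn idx true ls = [] := by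
  induction ls generalizing idx with
  | nil => rfl
  | cons l ls ih => simp [pvGoA, ih]

theorem pvGoA_false_eq (fn : String) (ls : List String) (idx : Int) :
    pvGoA fn idx false ls = pvGoB fn idx (ls.take (ls.findIdx pvIsTOC)) := by
  induction ls generalizing idx with
  | nil => rfl
  | cons l ls ih =>
    by_cases h : pvIsTOC l = true
    · simp [pvGoA, pvGoB, List.findIdx_cons, h, pvGoA_true]
    · simp only [pvGoA, List.findIdx_cons, h, Bool.not_false, Bool.true_and,
        if_false, Bool.false_eq_true]
      simp [List.take_succ_cons, pvGoB, ih, pvWarnA_eq_pvWarnB]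

-- ===== VERDICT (by name: the statement is the Claim_ definition above) =====
theorem verify_toc_and_warnings_from_lines_py_spec : Claim_equal_verify_toc_and_warnings_from_lines_py := by
  intro lines file_name _
  unfold Spec_verify_toc_and_warnings_from_lines_py
  unfold verify_toc_and_warnings_from_lines_py verify_toc_and_warnings_from_lines_py_alt
  exact pvGoA_false_eq file_name lines 1
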